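-- pv_equiv track=rewrite | github.com/FBI1314/neural-template-gen | data/utils.py | get_e2e_poswrds
-- ===== SOURCE A (Python) =====
-- def get_e2e_poswrds(tokes):
--     """将标记好的模板格式化，key是类别，比如姓名，价格变化区间，每一类key对应若干词，用num标记他们的顺序
--
--     assumes a key only appears once per line...
--     returns (key, num) -> word
--     比如 tokens='''__start_name__ The Vaults __end_name__ __start_eatType__ pub __end_eatType__ __start_priceRange__ more than £ 30 __end_priceRange__ __start_customerrating__ 5 out of 5 __end_customerrating__ __start_near__ Café Adriatic __end_near__'''
--     返回：
--         {('_customerrating', 1): '5',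
--          ('_customerrating', 2): 'out',
--          ('_customerrating', 3): 'of',
--          ('_customerrating', 4): '5',
--          ('_eatType', 1): 'pub',
--          ('_name', 1): 'The',
--          ('_name', 2): 'Vaults',
--          ('_near', 1): 'Café',
--          ('_near', 2): 'Adriatic',
--          ('_priceRange', 1): 'more',
--          ('_priceRange', 2): 'than',
--          ('_priceRange', 3): '£',
--          ('_priceRange', 4): '30'}
--     """
--     fields = {}
--     state, num = None, 1 # 1-idx the numbering
--     for toke in tokes:
--         if "__start" in toke:
--             assert state is None
--             state = toke[7:-2]
--         elif "__end" in toke: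
--             state, num = None, 1
--         elif state is not None:
--             fields[state, num] = toke
--             num += 1
--     return fields
-- ===== SOURCE B (Python) =====
-- def get_e2e_poswrds(tokes):
--     # Pass 1: split the token stream into (key, words) segments.
--     segments = []
--     cur = None
--     for toke in tokes:
--         if "__start" in toke:
--             assert cur is None
--             cur = []
--             segments.append((toke[7:-2], cur))
--         elif "__end" in toke:
--             cur = None
--         elif cur is not None:
--             cur.append(toke)
--     # Pass 2: number each segment's words by position.
--     return {(key, i): w for key, words in segments for i, w in enumerate(words, 1)}
-- ===== Notes on version B (the rewrite author's own statement) =====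
-- stated objective: alternative
-- what changed: B separates parsing from numbering: a first pass groups tokens into (key, words) segments, then a dict comprehension derives each word's number from its position via enumerate, instead of A's single loop threading a running counter and writing into the dict.
import Mathlib
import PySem

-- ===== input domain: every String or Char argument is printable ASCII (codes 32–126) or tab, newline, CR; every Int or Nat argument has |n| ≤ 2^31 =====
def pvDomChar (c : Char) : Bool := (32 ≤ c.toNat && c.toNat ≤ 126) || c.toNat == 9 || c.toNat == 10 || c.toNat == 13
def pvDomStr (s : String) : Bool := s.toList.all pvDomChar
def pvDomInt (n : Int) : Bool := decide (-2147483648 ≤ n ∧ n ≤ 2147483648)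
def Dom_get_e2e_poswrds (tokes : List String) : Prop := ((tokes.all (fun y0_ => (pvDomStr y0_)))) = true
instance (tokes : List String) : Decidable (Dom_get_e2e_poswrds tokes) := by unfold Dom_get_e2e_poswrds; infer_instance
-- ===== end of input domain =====

-- B re-decomposes A's single counter-threading loop into a segment-grouping pass plus a
-- position-based numbering comprehension ("alternative" objective, same O(n) cost).

-- ===== PORT A =====
-- A's loop state: (state : Option key, num, fields); the assert-fail input (a "__start"
-- token while state is already set) raises in Python and is excluded by Pre_ below.
def pvAStep (st : Option String × Int × PySem.Dict (String × Int) String) (toke : String) :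
    Option String × Int × PySem.Dict (String × Int) String :=
  if PySem.Str.isIn "__start" toke then
    (some (PySem.Str.slice toke (some 7) (some (-2))), st.2.1, st.2.2)
  else if PySem.Str.isIn "__end" toke then
    (none, 1, st.2.2)
  else
    match st.1 with
    | some s => (st.1, st.2.1 + 1, st.2.2.insert (s, st.2.1) toke)
    | none => st

def get_e2e_poswrds (tokes : List String) : List (String × Int × String) :=
  ((tokes.foldl pvAStep (none, 1, PySem.Dict.empty)).2.2).items.map (fun p => (p.1.1, p.1.2, p.2))

-- ===== PORT B =====
-- B's first pass: closed segments plus the currently open segment (Python appends the open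
-- list into `segments` at start time and keeps mutating it through `cur`; modelled as
-- closed ++ cur.toList).  On the excluded assert-fail input the open segment is closed.
def pvBStep (st : List (String × List String) × Option (String × List String)) (toke : String) :
    List (String × List String) × Option (String × List String) :=
  if PySem.Str.isIn "__start" toke then
    (st.1 ++ st.2.toList, some (PySem.Str.slice toke (some 7) (some (-2)), []))
  else if PySem.Str.isIn "__end" toke then
    (st.1 ++ st.2.toList, none)
  else
    match st.2 with
    | some c => (st.1, some (c.1, c.2 ++ [toke]))
    | none => st

-- {(key, i): w for key, words in segments for i, w in enumerate(words, 1)}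
def pvDictOfSegs (segs : List (String × List String)) : PySem.Dict (String × Int) String :=
  segs.foldl
    (fun d seg => (PySem.List.enumerate seg.2 1).foldl (fun d iw => d.insert (seg.1, iw.1) iw.2) d)
    PySem.Dict.empty

def get_e2e_poswrds_alt (tokes : List String) : List (String × Int × String) :=
  let st := tokes.foldl pvBStep ([], none)
  (pvDictOfSegs (st.1 ++ st.2.toList)).items.map (fun p => (p.1.1, p.1.2, p.2))

-- ===== PRECONDITION & SPEC =====
def pvIsStartTok (t : String) : Bool := PySem.Str.isIn "__start" t
def pvIsEndTok (t : String) : Bool := !pvIsStartTok t && PySem.Str.isIn "__end" t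

-- Pre_ excludes exactly the inputs where A's `assert state is None` fails (Python raises
-- AssertionError): a "__start" token reached while a segment is still open, i.e. two
-- start markers with no end marker in between.
def Pre_get_e2e_poswrds (tokes : List String) : Prop :=
  List.IsChain (fun a b => a = false ∨ b = false)
    (false :: (tokes.filter (fun t => pvIsStartTok t || pvIsEndTok t)).map pvIsStartTok)

instance (tokes : List String) : Decidable (Pre_get_e2e_poswrds tokes) := by
  unfold Pre_get_e2e_poswrds; infer_instance

def pvWitness_get_e2e_poswrds : List String :=
  ["__start_name__", "The", "Vaults", "__end_name__", "__start_eatType__", "pub", "__end_eatType__"]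

def Spec_get_e2e_poswrds (tokes : List String) (out : List (String × Int × String)) : Prop :=
  out = get_e2e_poswrds_alt tokes
instance (tokes : List String) (out : List (String × Int × String)) : Decidable (Spec_get_e2e_poswrds tokes out) := by unfold Spec_get_e2e_poswrds; infer_instance

-- ===== CLAIM (what is proved, stated in full; the proofs are below) =====
def Claim_equal_get_e2e_poswrds : Prop := ∀ (tokes : List String), Dom_get_e2e_poswrds tokes → Pre_get_e2e_poswrds tokes → Spec_get_e2e_poswrds tokes (get_e2e_poswrds tokes)

-- ===== LEMMAS AND PROOFS =====

-- the marker list (start/end tokens only, start = true) of the remaining tokens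
def pvMarkers (tokes : List String) : List Bool :=
  (tokes.filter (fun t => pvIsStartTok t || pvIsEndTok t)).map pvIsStartTok

lemma pv_chain_set_head {R : Bool → Bool → Prop} {a b : Bool} {l : List Bool}
    (h : List.IsChain R (a :: l)) (hr : ∀ x, l.head? = some x → R b x) :
    List.IsChain R (b :: l) := by
  cases l with
  | nil => exact .singleton b
  | cons x xs =>
    rcases h with _ | _ | ⟨_, h2⟩
    exact .cons_cons (hr x rfl) h2

lemma pv_enumerate_append_singleton (ws : List String) (t : String) (s : Int) :
    PySem.List.enumerate (ws ++ [t]) s = PySem.List.enumerate ws s ++ [(s + ws.length, t)] := by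
  induction ws generalizing s with
  | nil => simp [PySem.List.enumerate_nil, PySem.List.enumerate_cons]
  | cons w ws ih =>
    simp [PySem.List.enumerate_cons, ih]
    ring_nf

-- appending one word to the open segment = one insert into the comprehension's dict
lemma pv_dictOfSegs_append_word (closed : List (String × List String)) (k : String)
    (ws : List String) (t : String) :
    pvDictOfSegs (closed ++ [(k, ws ++ [t])])
      = (pvDictOfSegs (closed ++ [(k, ws)])).insert (k, (ws.length : Int) + 1) t := by
  simp [pvDictOfSegs, List.foldl_append, pv_enumerate_append_singleton]
  ring_nf

lemma pv_dictOfSegs_append_nil (closed : List (String × List String)) (k : String) :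
    pvDictOfSegs (closed ++ [(k, [])]) = pvDictOfSegs closed := by
  simp [pvDictOfSegs, List.foldl_append, PySem.List.enumerate_nil]

-- image of B's state under the abstraction that yields A's state
def pvAbs (st : List (String × List String) × Option (String × List String)) :
    Option String × Int × PySem.Dict (String × Int) String :=
  (st.2.map Prod.fst,
   ((st.2.map fun c => (c.2.length : Int)).getD 0) + 1,
   pvDictOfSegs (st.1 ++ st.2.toList))

-- main invariant: A's fold simulates B's fold through pvAbs, given no nested start
lemma pv_loop_eq (ts : List String) :
    ∀ (closed : List (String × List String)) (cur : Option (String × List String)),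
    List.IsChain (fun a b => a = false ∨ b = false) (cur.isSome :: pvMarkers ts) →
    ts.foldl pvAStep (pvAbs (closed, cur)) = pvAbs (ts.foldl pvBStep (closed, cur)) := by
  induction ts with
  | nil => intro closed cur _; simp
  | cons t ts ih =>
    intro closed cur hch
    by_cases hs : PySem.Chars.isIn ['_', '_', 's', 't', 'a', 'r', 't'] t.toList = true
    · -- start token: the chain condition forces cur = none
      have hmark : pvMarkers (t :: ts) = true :: pvMarkers ts := by
        simp [pvMarkers, List.filter, pvIsStartTok, hs]
      rw [hmark] at hch
      rcases hch with _ | _ | ⟨hrel, hch2⟩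
      have hcur : cur = none := by
        rcases hrel with h | h
        · cases cur <;> simp_all
        · simp at h
      subst hcur
      have hB : pvBStep (closed, none) t
          = (closed, some (PySem.Str.slice t (some 7) (some (-2)), [])) := by
        simp [pvBStep, hs]
      have hstep : pvAStep (pvAbs (closed, none)) t = pvAbs (pvBStep (closed, none) t) := by
        rw [hB]; simp [pvAStep, pvAbs, hs, pv_dictOfSegs_append_nil]
      rw [List.foldl_cons, List.foldl_cons, hstep, hB]
      exact ih _ _ (by simpa using hch2)
    · rw [Bool.not_eq_true] at hs
      by_cases he : PySem.Chars.isIn ['_', '_', 'e', 'n', 'd'] t.toList = true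
      · -- end token
        have hmark : pvMarkers (t :: ts) = false :: pvMarkers ts := by
          simp [pvMarkers, List.filter, pvIsStartTok, pvIsEndTok, hs, he]
        rw [hmark] at hch
        have hB : pvBStep (closed, cur) t = (closed ++ cur.toList, none) := by
          simp [pvBStep, hs, he]
        have hstep : pvAStep (pvAbs (closed, cur)) t = pvAbs (pvBStep (closed, cur) t) := by
          rw [hB]; simp [pvAStep, pvAbs, hs, he]
        rw [List.foldl_cons, List.foldl_cons, hstep, hB]
        refine ih _ _ ?_
        simp only [Option.isSome_none]
        exact pv_chain_set_head hch.tail (fun x _ => Or.inl rfl)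
      · -- plain word token
        rw [Bool.not_eq_true] at he
        have hmark : pvMarkers (t :: ts) = pvMarkers ts := by
          simp [pvMarkers, List.filter, pvIsStartTok, pvIsEndTok, hs, he]
        rw [hmark] at hch
        cases cur with
        | none =>
          have hB : pvBStep (closed, none) t = (closed, none) := by
            simp [pvBStep, hs, he]
          have hstep : pvAStep (pvAbs (closed, none)) t = pvAbs (pvBStep (closed, none) t) := by
            rw [hB]; simp [pvAStep, pvAbs, hs, he]
          rw [List.foldl_cons, List.foldl_cons, hstep, hB]
          exact ih _ _ (by simpa using hch)
        | some c =>
          have hB : pvBStep (closed, some c) t = (closed, some (c.1, c.2 ++ [t])) := by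
            simp [pvBStep, hs, he]
          have hstep : pvAStep (pvAbs (closed, some c)) t
              = pvAbs (pvBStep (closed, some c) t) := by
            rw [hB]
            simp [pvAStep, pvAbs, hs, he, pv_dictOfSegs_append_word]
          rw [List.foldl_cons, List.foldl_cons, hstep, hB]
          exact ih _ _ (by simpa using hch)

-- ===== VERDICT (by name: the statement is the Claim_ definition above) =====
theorem get_e2e_poswrds_spec : Claim_equal_get_e2e_poswrds := by
  intro tokes _ hpre
  unfold Spec_get_e2e_poswrds get_e2e_poswrds get_e2e_poswrds_alt
  have h := pv_loop_eq tokes [] none (by simpa [pvMarkers] using hpre)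
  have h0 : (none, (1 : Int), (PySem.Dict.empty : PySem.Dict (String × Int) String))
      = pvAbs ([], none) := by simp [pvAbs, pvDictOfSegs]
  rw [h0, h]
  rfl
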